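-- pv_equiv track=rewrite | github.com/github/codeql-action | .github/workflows/script/rollback_changelog.py | drop_unreleased_section
-- ===== SOURCE A (Python) =====
-- def drop_unreleased_section(lines: list[str]):
--   before_first_section = ''
--   after_first_section = ''
--   found_first_section = False
--   skipped_first_section = False
--
--   for i, line in enumerate(lines):
--     if line.startswith('## ') and not found_first_section:
--       found_first_section = True
--     elif line.startswith('## ') and found_first_section:
--       skipped_first_section = True
--
--     if not found_first_section:
--       before_first_section += line
--     if skipped_first_section:
--       after_first_section += line
--
--   return (before_first_section, after_first_section)
-- ===== SOURCE B (Python) =====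
-- def drop_unreleased_section(lines: list[str]):
--   headers = [i for i, line in enumerate(lines) if line.startswith('## ')]
--   before = ''.join(lines[:headers[0]]) if headers else ''.join(lines)
--   after = ''.join(lines[headers[1]:]) if len(headers) >= 2 else ''
--   return (before, after)
-- ===== Notes on version B (the rewrite author's own statement) =====
-- stated objective: simpler
-- what changed: Replaces the two-boolean-flag single pass with += accumulation by computing the list of '## ' header indices once and returning joins of two slices (lines[:headers[0]] and lines[headers[1]:]).
import Mathlib
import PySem

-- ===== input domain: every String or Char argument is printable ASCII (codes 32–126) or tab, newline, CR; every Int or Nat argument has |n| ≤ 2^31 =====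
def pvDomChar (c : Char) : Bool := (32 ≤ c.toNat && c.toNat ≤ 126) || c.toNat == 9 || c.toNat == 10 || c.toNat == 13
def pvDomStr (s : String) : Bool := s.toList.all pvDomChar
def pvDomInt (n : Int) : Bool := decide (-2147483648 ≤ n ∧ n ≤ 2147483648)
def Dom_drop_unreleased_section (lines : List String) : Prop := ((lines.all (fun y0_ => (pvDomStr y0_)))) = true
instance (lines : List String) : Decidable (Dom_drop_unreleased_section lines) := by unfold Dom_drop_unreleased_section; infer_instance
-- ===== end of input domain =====

-- B replaces A's two-boolean-flag accumulation pass by an index-then-slice decomposition (simpler); return values proved equal.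


-- ===== PORT A =====
-- A's for-loop over (line, flags, accumulators); string += is carried on the
-- List Char side (exact: Python str concatenation = append of the code-point lists).
def dusLoopA : List String → List Char → List Char → Bool → Bool → List Char × List Char
  | [], bef, aft, _, _ => (bef, aft)
  | line :: rest, bef, aft, found, skipped =>
    let (found', skipped') :=
      if PySem.Str.startswith line "## " && !found then (true, skipped)
      else if PySem.Str.startswith line "## " && found then (found, true)
      else (found, skipped)
    let bef' := if !found' then bef ++ line.toList else bef
    let aft' := if skipped' then aft ++ line.toList else aft
    dusLoopA rest bef' aft' found' skipped'

def drop_unreleased_section (lines : List String) : String × String :=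
  let (b, a) := dusLoopA lines [] [] false false
  (String.ofList b, String.ofList a)

-- ===== PORT B =====
-- headers = [i for i, line in enumerate(lines) if line.startswith('## ')]
def dusHeaders (lines : List String) : List Int :=
  ((PySem.List.enumerate lines).filter (fun p => PySem.Str.startswith p.2 "## ")).map Prod.fst

def drop_unreleased_section_alt (lines : List String) : String × String :=
  let headers := dusHeaders lines
  let before := match headers with
    | [] => PySem.Str.join "" lines
    | h0 :: _ => PySem.Str.join "" (PySem.List.slice lines none (some h0))
  let after := match headers with
    | _ :: h1 :: _ => PySem.Str.join "" (PySem.List.slice lines (some h1) none)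
    | _ => ""
  (before, after)

-- ===== PRECONDITION & SPEC =====
def Spec_drop_unreleased_section (lines : List String) (out : String × String) : Prop := out = drop_unreleased_section_alt lines
instance (lines : List String) (out : String × String) : Decidable (Spec_drop_unreleased_section lines out) := by unfold Spec_drop_unreleased_section; infer_instance

-- ===== CLAIM (what is proved, stated in full; the proofs are below) =====
def Claim_equal_drop_unreleased_section : Prop := ∀ (lines : List String), Dom_drop_unreleased_section lines → Spec_drop_unreleased_section lines (drop_unreleased_section lines)

-- ===== LEMMAS AND PROOFS =====

-- common reference point: a simple recursive specification of the two pieces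
def dusFlat : List String → List Char
  | [] => []
  | l :: rest => l.toList ++ dusFlat rest

-- chars of the "after" part, counted from the FIRST header of its argument
def dusSpec2 : List String → List Char
  | [] => []
  | l :: rest =>
    if PySem.Str.startswith l "## " then l.toList ++ dusFlat rest else dusSpec2 rest

def dusSpec : List String → List Char × List Char
  | [] => ([], [])
  | l :: rest =>
    if PySem.Str.startswith l "## " then ([], dusSpec2 rest)
    else ((l.toList ++ (dusSpec rest).1), (dusSpec rest).2)

-- generalized header-index list (proof-side view of dusHeaders)
def dusE (s : Int) (ls : List String) : List Int :=
  ((PySem.List.enumerate ls s).filter (fun p => PySem.Str.startswith p.2 "## ")).map Prod.fst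

theorem dusHeaders_eq (lines : List String) : dusHeaders lines = dusE 0 lines := rfl

theorem dusE_cons_pos (s : Int) (l : String) (ls : List String)
    (hx : PySem.Chars.startswith l.toList ['#', '#', ' '] = true) :
    dusE s (l :: ls) = s :: dusE (s + 1) ls := by
  simp [dusE, PySem.List.enumerate_cons, hx]

theorem dusE_cons_neg (s : Int) (l : String) (ls : List String)
    (hx : ¬ PySem.Chars.startswith l.toList ['#', '#', ' '] = true) :
    dusE s (l :: ls) = dusE (s + 1) ls := by
  simp [dusE, PySem.List.enumerate_cons, hx]

theorem dusE_succ (ls : List String) : ∀ s : Int, dusE (s + 1) ls = (dusE s ls).map (· + 1) := by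
  induction ls with
  | nil => intro s; simp [dusE]
  | cons x ls ih =>
    intro s
    by_cases hx : PySem.Chars.startswith x.toList ['#', '#', ' '] = true
    · rw [dusE_cons_pos _ _ _ hx, dusE_cons_pos _ _ _ hx, ih (s + 1)]
      simp
    · rw [dusE_cons_neg _ _ _ hx, dusE_cons_neg _ _ _ hx, ih (s + 1)]

theorem dusJoin_flat (ls : List String) :
    PySem.Chars.join [] (ls.map String.toList) = dusFlat ls := by
  induction ls with
  | nil => simp [PySem.Chars.join_nil, dusFlat]
  | cons x ls ih =>
    cases ls with
    | nil => simp [PySem.Chars.join_singleton, dusFlat]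
    | cons y rest =>
      simp only [List.map_cons] at ih ⊢
      rw [PySem.Chars.join_cons_cons]
      simp [dusFlat, ih]

theorem dusJoin_eq (ls : List String) :
    PySem.Str.join "" ls = String.ofList (dusFlat ls) := by
  simp [PySem.Str.join, dusJoin_flat]

-- A's loop, once both flags are set: everything goes to "after"
theorem dusLoopA_tt (ls : List String) : ∀ bef aft,
    dusLoopA ls bef aft true true = (bef, aft ++ dusFlat ls) := by
  induction ls with
  | nil => intro bef aft; simp [dusLoopA, dusFlat]
  | cons l rest ih =>
    intro bef aft
    by_cases h : PySem.Chars.startswith l.toList ['#', '#', ' '] = true <;> simp [dusLoopA, dusFlat, h, ih]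

-- A's loop after the first header: "after" collects from the next header on
theorem dusLoopA_tf (ls : List String) : ∀ bef aft,
    dusLoopA ls bef aft true false = (bef, aft ++ dusSpec2 ls) := by
  induction ls with
  | nil => intro bef aft; simp [dusLoopA, dusSpec2]
  | cons l rest ih =>
    intro bef aft
    by_cases h : PySem.Chars.startswith l.toList ['#', '#', ' '] = true
    · simp [dusLoopA, dusSpec2, h, dusLoopA_tt]
    · simp [dusLoopA, dusSpec2, h, ih]

-- A's loop from the initial state computes dusSpec
theorem dusLoopA_ff (ls : List String) : ∀ bef aft,
    dusLoopA ls bef aft false false = (bef ++ (dusSpec ls).1, aft ++ (dusSpec ls).2) := by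
  induction ls with
  | nil => intro bef aft; simp [dusLoopA, dusSpec]
  | cons l rest ih =>
    intro bef aft
    by_cases h : PySem.Chars.startswith l.toList ['#', '#', ' '] = true
    · simp [dusLoopA, dusSpec, h, dusLoopA_tf]
    · simp [dusLoopA, dusSpec, h, ih]

theorem dusSpec2_of_E (ls : List String) :
    (dusE 0 ls = [] → dusSpec2 ls = []) ∧
    (∀ h t, dusE 0 ls = h :: t → 0 ≤ h ∧ dusSpec2 ls = dusFlat (ls.drop h.toNat)) := by
  induction ls with
  | nil => exact ⟨fun _ => rfl, fun h t hE => by simp [dusE] at hE⟩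
  | cons x ls ih =>
    by_cases hx : PySem.Chars.startswith x.toList ['#', '#', ' '] = true
    · rw [dusE_cons_pos _ _ _ hx, dusE_succ ls 0]
      refine ⟨fun hE => by simp at hE, ?_⟩
      intro h t hE
      rw [List.cons.injEq] at hE
      obtain ⟨rfl, _⟩ := hE
      simp [dusSpec2, hx, dusFlat]
    · rw [dusE_cons_neg _ _ _ hx, dusE_succ ls 0]
      constructor
      · intro hE
        rw [List.map_eq_nil_iff] at hE
        simp [dusSpec2, hx, ih.1 hE]
      · intro h t hE
        cases hE' : dusE 0 ls with
        | nil => rw [hE'] at hE; simp at hE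
        | cons h' t' =>
          rw [hE', List.map_cons, List.cons.injEq] at hE
          obtain ⟨rfl, _⟩ := hE
          obtain ⟨hnn, hs⟩ := ih.2 h' t' hE'
          refine ⟨by omega, ?_⟩
          have htn : (h' + 1).toNat = h'.toNat + 1 := by omega
          simp [dusSpec2, hx, hs, htn]

theorem dusSpec_of_E (ls : List String) :
    (dusE 0 ls = [] → dusSpec ls = (dusFlat ls, [])) ∧
    (∀ h0 t, dusE 0 ls = h0 :: t →
      0 ≤ h0 ∧ (dusSpec ls).1 = dusFlat (ls.take h0.toNat) ∧
      (t = [] → (dusSpec ls).2 = []) ∧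
      (∀ h1 t', t = h1 :: t' → 0 ≤ h1 ∧ (dusSpec ls).2 = dusFlat (ls.drop h1.toNat))) := by
  induction ls with
  | nil =>
    exact ⟨fun _ => rfl, fun h0 t hE => by simp [dusE] at hE⟩
  | cons x ls ih =>
    by_cases hx : PySem.Chars.startswith x.toList ['#', '#', ' '] = true
    · rw [dusE_cons_pos _ _ _ hx, dusE_succ ls 0]
      refine ⟨fun hE => by simp at hE, ?_⟩
      intro h0 t hE
      rw [List.cons.injEq] at hE
      obtain ⟨rfl, rfl⟩ := hE
      refine ⟨le_refl _, by simp [dusSpec, hx, dusFlat], ?_, ?_⟩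
      · intro ht
        rw [List.map_eq_nil_iff] at ht
        simp [dusSpec, hx, (dusSpec2_of_E ls).1 ht]
      · intro h1 t' ht
        cases hE' : dusE 0 ls with
        | nil => rw [hE'] at ht; simp at ht
        | cons h' t'' =>
          rw [hE', List.map_cons, List.cons.injEq] at ht
          obtain ⟨rfl, _⟩ := ht
          obtain ⟨hnn, hs⟩ := (dusSpec2_of_E ls).2 h' t'' hE'
          refine ⟨by omega, ?_⟩
          have htn : (h' + 1).toNat = h'.toNat + 1 := by omega
          simp [dusSpec, hx, hs, htn]
    · rw [dusE_cons_neg _ _ _ hx, dusE_succ ls 0]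
      constructor
      · intro hE
        rw [List.map_eq_nil_iff] at hE
        simp [dusSpec, hx, ih.1 hE, dusFlat]
      · intro h0 t hE
        cases hE' : dusE 0 ls with
        | nil => rw [hE'] at hE; simp at hE
        | cons h0' t0 =>
          rw [hE', List.map_cons, List.cons.injEq] at hE
          obtain ⟨rfl, rfl⟩ := hE
          obtain ⟨hnn, h1eq, h2nil, h2cons⟩ := ih.2 h0' t0 hE'
          have htn : (h0' + 1).toNat = h0'.toNat + 1 := by omega
          refine ⟨by omega, ?_, ?_, ?_⟩
          · simp [dusSpec, hx, h1eq, htn, dusFlat]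
          · intro ht
            rw [List.map_eq_nil_iff] at ht
            simp [dusSpec, hx, h2nil ht]
          · intro h1 t' ht
            cases ht0 : t0 with
            | nil => rw [ht0] at ht; simp at ht
            | cons h1' t1 =>
              rw [ht0, List.map_cons, List.cons.injEq] at ht
              obtain ⟨rfl, _⟩ := ht
              obtain ⟨hnn1, hs⟩ := h2cons h1' t1 ht0
              have htn1 : (h1' + 1).toNat = h1'.toNat + 1 := by omega
              refine ⟨by omega, ?_⟩
              simp [dusSpec, hx, hs, htn1]

theorem dusAlt_eq_spec (lines : List String) :
    drop_unreleased_section_alt lines =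
      (String.ofList (dusSpec lines).1, String.ofList (dusSpec lines).2) := by
  unfold drop_unreleased_section_alt
  rw [dusHeaders_eq]
  cases hE : dusE 0 lines with
  | nil =>
    have := (dusSpec_of_E lines).1 hE
    simp [this, dusJoin_eq]
  | cons h0 t =>
    obtain ⟨hnn, h1eq, h2nil, h2cons⟩ := (dusSpec_of_E lines).2 h0 t hE
    cases t with
    | nil =>
      simp only []
      rw [PySem.List.slice_to lines hnn, dusJoin_eq, h1eq, h2nil rfl]
    | cons h1 t' =>
      obtain ⟨hnn1, hs⟩ := h2cons h1 t' rfl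
      simp only []
      rw [PySem.List.slice_to lines hnn, PySem.List.slice_from lines hnn1,
        dusJoin_eq, dusJoin_eq, h1eq, hs]

-- ===== VERDICT (by name: the statement is the Claim_ definition above) =====
theorem drop_unreleased_section_spec : Claim_equal_drop_unreleased_section := by
  intro lines _
  unfold Spec_drop_unreleased_section
  rw [dusAlt_eq_spec]
  unfold drop_unreleased_section
  rw [dusLoopA_ff lines [] []]
  simp
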